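-- pv_equiv track=rewrite | github.com/elevanaltd/octave-mcp | src/octave_mcp/mcp/write.py | _build_literal_zone_line_set
-- ===== SOURCE A (Python) =====
-- def _build_literal_zone_line_set(content: str) -> set[int]:
--     """Build a set of 1-based line numbers that fall inside literal zones.
--
--     Literal zones are ``` fenced blocks. Lines between (and including) the
--     opening and closing fences are considered inside the zone.
--     """
--     inside_lines: set[int] = set()
--     in_zone = False
--     for line_num, line in enumerate(content.split("\n"), start=1):
--         stripped = line.strip()
--         if stripped.startswith("```"):
--             if not in_zone:
--                 in_zone = True
--                 inside_lines.add(line_num)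
--             else:
--                 inside_lines.add(line_num)
--                 in_zone = False
--             continue
--         if in_zone:
--             inside_lines.add(line_num)
--     return inside_lines
-- ===== SOURCE B (Python) =====
-- def _build_literal_zone_line_set(content: str) -> set[int]:
--     """Two-phase: collect fence line numbers, then expand fence pairs to zones.
--
--     An unpaired trailing fence opens a zone that runs to the last line.
--     """
--     lines = content.split("\n")
--     fences = [i for i, line in enumerate(lines, 1)
--               if line.strip().startswith("```")]
--     zones = []
--     while fences:
--         open_ = fences[0]
--         close = fences[1] if len(fences) > 1 else len(lines)
--         zones.extend(range(open_, close + 1))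
--         fences = fences[2:]
--     return set(zones)
-- ===== Notes on version B (the rewrite author's own statement) =====
-- stated objective: alternative
-- what changed: Replaces A's single stateful scan (in_zone flag toggled per line) by a two-phase decomposition: first collect the 1-based line numbers of all fence lines, then expand consecutive fence pairs (an unpaired last fence extends to the final line) into ranges and return their set.
import Mathlib
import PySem

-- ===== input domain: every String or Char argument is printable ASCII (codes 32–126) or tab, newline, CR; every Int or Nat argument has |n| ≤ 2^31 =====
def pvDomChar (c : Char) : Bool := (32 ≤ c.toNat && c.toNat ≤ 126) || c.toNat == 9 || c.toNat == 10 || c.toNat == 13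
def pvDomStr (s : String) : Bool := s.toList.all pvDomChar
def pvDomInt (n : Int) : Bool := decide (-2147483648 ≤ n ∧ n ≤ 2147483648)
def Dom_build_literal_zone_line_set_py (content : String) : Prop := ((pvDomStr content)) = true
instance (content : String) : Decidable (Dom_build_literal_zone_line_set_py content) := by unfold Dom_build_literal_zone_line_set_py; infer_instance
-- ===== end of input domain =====

-- B replaces A's stateful line scan by collect-fences-then-expand-pairs (alternative decomposition, same cost).

-- ===== PORT A =====
-- loop body of A's for-loop: state = (inside_lines, in_zone)
def pvStepA (st : PySem.Set Int × Bool) (p : Int × String) : PySem.Set Int × Bool :=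
  let stripped := PySem.Str.strip p.2
  if PySem.Str.startswith stripped "```" then
    if !st.2 then (PySem.Set.add st.1 p.1, true)
    else (PySem.Set.add st.1 p.1, false)
  else if st.2 then (PySem.Set.add st.1 p.1, st.2) else st

def build_literal_zone_line_set_py (content : String) : List Int :=
  ((PySem.List.enumerate (((PySem.Str.split? content "\n").getD [])) 1).foldl pvStepA
    ((PySem.Set.empty : PySem.Set Int), false)).1

-- ===== PORT B =====
-- B's while-loop over the fence list: pair (open, close) → range open..close; lone fence → open..n
def pvExpand (n : Int) : List Int → List Int
  | [] => []
  | [a] => PySem.List.pyRange a (n + 1) 1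
  | a :: b :: rest => PySem.List.pyRange a (b + 1) 1 ++ pvExpand n rest

def build_literal_zone_line_set_py_alt (content : String) : List Int :=
  PySem.Set.ofList (pvExpand (((PySem.Str.split? content "\n").getD []).length : Int)
    (((PySem.List.enumerate ((PySem.Str.split? content "\n").getD []) 1).filter
      (fun p => PySem.Str.startswith (PySem.Str.strip p.2) "```")).map (·.1)))

-- ===== PRECONDITION & SPEC =====
def Spec_build_literal_zone_line_set_py (content : String) (out : List Int) : Prop := out = build_literal_zone_line_set_py_alt content
instance (content : String) (out : List Int) : Decidable (Spec_build_literal_zone_line_set_py content out) := by unfold Spec_build_literal_zone_line_set_py; infer_instance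

-- ===== CLAIM (what is proved, stated in full; the proofs are below) =====
def Claim_equal_build_literal_zone_line_set_py : Prop := ∀ (content : String), Dom_build_literal_zone_line_set_py content → Spec_build_literal_zone_line_set_py content (build_literal_zone_line_set_py content)

-- ===== LEMMAS AND PROOFS =====

-- reference recursion: the line numbers A marks, scanning lines from number k with flag b
def pvMark (k : Int) (b : Bool) : List String → List Int
  | [] => []
  | l :: rest =>
    if PySem.Str.startswith (PySem.Str.strip l) "```" then k :: pvMark (k + 1) (!b) rest
    else if b then k :: pvMark (k + 1) b rest else pvMark (k + 1) b rest

-- reference recursion: the fence line numbers, scanning from number k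
def pvFences (k : Int) : List String → List Int
  | [] => []
  | l :: rest =>
    if PySem.Str.startswith (PySem.Str.strip l) "```" then k :: pvFences (k + 1) rest
    else pvFences (k + 1) rest

theorem pvFences_eq (lines : List String) : ∀ k : Int,
    ((PySem.List.enumerate lines k).filter
      (fun p => PySem.Str.startswith (PySem.Str.strip p.2) "```")).map (·.1)
      = pvFences k lines := by
  induction lines with
  | nil => intro k; simp [PySem.List.enumerate_nil, pvFences]
  | cons l rest ih =>
    intro k
    rw [PySem.List.enumerate_cons]
    by_cases h : PySem.Chars.startswith (PySem.Chars.strip l.toList) (['`','`','`'] : List Char) = true <;>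
      (simp [pvFences, h]; simpa using ih (k + 1))

theorem pvMark_ge (lines : List String) : ∀ (k : Int) (b : Bool) (x : Int),
    x ∈ pvMark k b lines → k ≤ x := by
  induction lines with
  | nil => intro k b x hx; simp [pvMark] at hx
  | cons l rest ih =>
    intro k b x hx
    unfold pvMark at hx
    split_ifs at hx with h1 h2
    · rcases List.mem_cons.mp hx with rfl | hx
      · omega
      · have := ih (k + 1) _ x hx; omega
    · rcases List.mem_cons.mp hx with rfl | hx
      · omega
      · have := ih (k + 1) _ x hx; omega
    · have := ih (k + 1) _ x hx; omega

theorem pvMark_pairwise (lines : List String) : ∀ (k : Int) (b : Bool),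
    (pvMark k b lines).Pairwise (· < ·) := by
  induction lines with
  | nil => intro k b; simp [pvMark]
  | cons l rest ih =>
    intro k b
    unfold pvMark
    split_ifs with h1 h2 <;>
      first
        | (refine List.Pairwise.cons ?_ (ih (k + 1) _)
           intro x hx
           have := pvMark_ge rest (k + 1) _ x hx
           omega)
        | exact ih (k + 1) _

theorem pvExpand_fences (lines : List String) : ∀ k : Int,
    pvExpand (k + lines.length - 1) (pvFences k lines) = pvMark k false lines ∧
    ∀ a : Int, a ≤ k →
      pvExpand (k + lines.length - 1) (a :: pvFences k lines)
        = PySem.List.pyRange a k 1 ++ pvMark k true lines := by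
  induction lines with
  | nil =>
    intro k
    constructor
    · simp [pvFences, pvMark, pvExpand]
    · intro a ha
      simp only [pvFences, pvMark, pvExpand, List.length_nil]
      have : k + (0 : Nat) - 1 + 1 = k := by push_cast; ring
      rw [this, List.append_nil]
  | cons l rest ih =>
    intro k
    have hN : k + ((l :: rest).length : Int) - 1 = (k + 1) + (rest.length : Int) - 1 := by
      push_cast [List.length_cons]; ring
    rw [hN]
    by_cases h : PySem.Chars.startswith (PySem.Chars.strip l.toList) (['`','`','`'] : List Char) = true
    · constructor
      · rw [show pvFences k (l :: rest) = k :: pvFences (k + 1) rest by simp [pvFences, h]]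
        rw [(ih (k + 1)).2 k (by omega)]
        rw [PySem.List.pyRange_one_singleton]
        simp [pvMark, h]
      · intro a ha
        rw [show pvFences k (l :: rest) = k :: pvFences (k + 1) rest by simp [pvFences, h]]
        have hexp : pvExpand ((k + 1) + (rest.length : Int) - 1) (a :: k :: pvFences (k + 1) rest)
            = PySem.List.pyRange a (k + 1) 1 ++ pvExpand ((k + 1) + (rest.length : Int) - 1) (pvFences (k + 1) rest) := by
          cases hf : pvFences (k + 1) rest <;> simp [pvExpand]
        rw [hexp, (ih (k + 1)).1]
        rw [PySem.List.pyRange_one_succ_right ha]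
        simp [pvMark, h]
    · constructor
      · rw [show pvFences k (l :: rest) = pvFences (k + 1) rest by simp [pvFences, h]]
        rw [(ih (k + 1)).1]
        simp [pvMark, h]
      · intro a ha
        rw [show pvFences k (l :: rest) = pvFences (k + 1) rest by simp [pvFences, h]]
        rw [(ih (k + 1)).2 a (by omega)]
        rw [PySem.List.pyRange_one_succ_right ha]
        simp [pvMark, h]

theorem pvFoldA_eq (lines : List String) : ∀ (k : Int) (s : PySem.Set Int) (b : Bool),
    (∀ x ∈ s, x < k) →
    ((PySem.List.enumerate lines k).foldl pvStepA (s, b)).1 = s ++ pvMark k b lines := by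
  induction lines with
  | nil => intro k s b hs; simp [PySem.List.enumerate_nil, pvMark]
  | cons l rest ih =>
    intro k s b hs
    rw [PySem.List.enumerate_cons, List.foldl_cons]
    have hadd : PySem.Set.add s k = s ++ [k] :=
      PySem.Set.add_of_not_mem (by intro hk; exact absurd (hs k hk) (by omega))
    have hs' : ∀ x ∈ s ++ [k], x < k + 1 := by
      intro x hx
      rcases List.mem_append.mp hx with hx | hx
      · have := hs x hx; omega
      · simp at hx; omega
    by_cases h : PySem.Chars.startswith (PySem.Chars.strip l.toList) (['`','`','`'] : List Char) = true
    · cases b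
      · rw [show pvStepA (s, false) (k, l) = (s ++ [k], true) by
            simp [pvStepA, h, hadd]]
        rw [ih (k + 1) (s ++ [k]) true hs']
        simp [pvMark, h]
      · rw [show pvStepA (s, true) (k, l) = (s ++ [k], false) by
            simp [pvStepA, h, hadd]]
        rw [ih (k + 1) (s ++ [k]) false hs']
        simp [pvMark, h]
    · cases b
      · rw [show pvStepA (s, false) (k, l) = (s, false) by simp [pvStepA, h]]
        rw [ih (k + 1) s false (fun x hx => by have := hs x hx; omega)]
        simp [pvMark, h]
      · rw [show pvStepA (s, true) (k, l) = (s ++ [k], true) by simp [pvStepA, h, hadd]]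
        rw [ih (k + 1) (s ++ [k]) true hs']
        simp [pvMark, h]

-- ===== VERDICT (by name: the statement is the Claim_ definition above) =====
theorem build_literal_zone_line_set_py_spec : Claim_equal_build_literal_zone_line_set_py := by
  intro content _
  unfold Spec_build_literal_zone_line_set_py
  unfold build_literal_zone_line_set_py build_literal_zone_line_set_py_alt
  set lines := ((PySem.Str.split? content "\n").getD [])
  rw [pvFoldA_eq lines 1 PySem.Set.empty false (by intro x hx; simp [PySem.Set.empty] at hx)]
  rw [pvFences_eq lines 1]
  have hlen : (lines.length : Int) = 1 + (lines.length : Int) - 1 := by ring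
  rw [hlen, (pvExpand_fences lines 1).1]
  have hnd : (pvMark 1 false lines).Nodup :=
    List.Pairwise.imp (fun h => ne_of_lt h) (pvMark_pairwise lines 1 false)
  simpa [PySem.Set.empty] using (PySem.Set.ofList_eq_self_of_nodup _ hnd).symm
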